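-- pv_equiv track=rewrite | github.com/ValerioSpagnoli/University | Fondamenti di Informatica 1/Esercitazioni/Esercitazione 7/A_Ex6.py | A_Ex6
-- ===== SOURCE A (Python) =====
-- def A_Ex6(a,b):
--     I = set()
--     A = list(a)
--     B = list(b)
--     for i in A:
--         x = i[1]
--         for j in B:
--             y = j[0]
--             if x == y:
--                 q = (i[0], j[1])
--                 I.add(q)
--     return I
-- ===== SOURCE B (Python) =====
-- def A_Ex6(a, b):
--     # Index b by first component once, then a single lookup per element of a.
--     idx = {}
--     for j in b:
--         idx.setdefault(j[0], []).append(j[1])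
--     I = set()
--     for i in a:
--         for z in idx.get(i[1], []):
--             I.add((i[0], z))
--     return I
-- ===== Notes on version B (the rewrite author's own statement) =====
-- stated objective: faster
-- what changed: Replaces the nested scan of b for every element of a by a dict grouping b's values by first component, so each element of a does one hash lookup.
import Mathlib
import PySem

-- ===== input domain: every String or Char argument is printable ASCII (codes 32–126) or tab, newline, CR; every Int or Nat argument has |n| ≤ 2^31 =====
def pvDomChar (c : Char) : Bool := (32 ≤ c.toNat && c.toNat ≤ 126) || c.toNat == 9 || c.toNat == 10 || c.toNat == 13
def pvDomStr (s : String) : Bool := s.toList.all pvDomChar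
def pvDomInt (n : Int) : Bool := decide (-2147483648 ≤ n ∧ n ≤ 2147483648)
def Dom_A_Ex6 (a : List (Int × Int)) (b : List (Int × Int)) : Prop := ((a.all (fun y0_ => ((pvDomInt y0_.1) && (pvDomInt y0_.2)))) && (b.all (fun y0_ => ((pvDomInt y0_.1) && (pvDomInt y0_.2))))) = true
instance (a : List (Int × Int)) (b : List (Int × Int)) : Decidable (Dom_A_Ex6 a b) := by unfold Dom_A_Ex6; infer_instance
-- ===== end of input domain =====

-- B replaces A's nested scan of b for every element of a by a dict that groups b's
-- second components by first component, built once; one lookup per element of a.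

-- ===== PORT A =====
def A_Ex6 (a : List (Int × Int)) (b : List (Int × Int)) : List (Int × Int) :=
  a.foldl (fun I i =>
    b.foldl (fun I j =>
      if i.2 == j.1 then PySem.Set.add I (i.1, j.2) else I) I)
    PySem.Set.empty

-- ===== PORT B =====
def A_Ex6_alt (a : List (Int × Int)) (b : List (Int × Int)) : List (Int × Int) :=
  let idx : PySem.Dict Int (List Int) :=
    b.foldl (fun d j => d.modify j.1 [] (· ++ [j.2])) PySem.Dict.empty
  a.foldl (fun I i =>
    (idx.getD i.2 []).foldl (fun I z => PySem.Set.add I (i.1, z)) I)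
    PySem.Set.empty

-- ===== PRECONDITION & SPEC =====
def Spec_A_Ex6 (a : List (Int × Int)) (b : List (Int × Int)) (out : List (Int × Int)) : Prop := out = A_Ex6_alt a b
instance (a : List (Int × Int)) (b : List (Int × Int)) (out : List (Int × Int)) : Decidable (Spec_A_Ex6 a b out) := by unfold Spec_A_Ex6; infer_instance

-- ===== CLAIM (what is proved, stated in full; the proofs are below) =====
def Claim_equal_A_Ex6 : Prop := ∀ (a : List (Int × Int)) (b : List (Int × Int)), Dom_A_Ex6 a b → Spec_A_Ex6 a b (A_Ex6 a b)

-- ===== LEMMAS AND PROOFS =====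

-- A's inner scan of b adds exactly the pairs (i.1, z) for z in b's matching second
-- components, in b's order — the same sequence B's grouped-list fold adds.
theorem inner_eq (i : Int × Int) (b : List (Int × Int)) (I : List (Int × Int)) :
    b.foldl (fun I j => if i.2 == j.1 then PySem.Set.add I (i.1, j.2) else I) I
      = ((b.filter (fun p => p.1 == i.2)).map (·.2)).foldl
          (fun I z => PySem.Set.add I (i.1, z)) I := by
  induction b generalizing I with
  | nil => rfl
  | cons j bs ih =>
      by_cases h : j.1 = i.2
      · simpa [List.foldl, h] using ih (PySem.Set.add I (i.1, j.2))
      · have h' : i.2 ≠ j.1 := fun hh => h hh.symm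
        simpa [List.foldl, h, h'] using ih I

theorem A_Ex6_spec : Claim_equal_A_Ex6 := by
  intro a b _
  show A_Ex6 a b = A_Ex6_alt a b
  unfold A_Ex6 A_Ex6_alt
  simp only [PySem.Dict.getD_foldl_modify_append, PySem.Dict.getD_empty,
    List.nil_append]
  exact PySem.List.foldl_congr_mem a _ _ _ (fun I i _ => inner_eq i b I)

-- ===== VERDICT (by name: the statement is the Claim_ definition above) =====
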